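-- pv_equiv track=rewrite | github.com/waveWhirlVfx/HoudiniMind | src/houdinimind/rag/kb_builder.py | _infer_list_entry_category
-- ===== SOURCE A (Python) =====
-- def _infer_list_entry_category(item: dict) -> str:
--     """P0-A: Infer category from the keys present in a structured list entry."""
--     keys = {k.lower() for k in item}
--     if keys & {"error", "symptoms", "cause", "fix", "detailed_solution"}:
--         return "errors"
--     if keys & {"workflow", "steps", "prerequisites"}:
--         return "workflow"
--     if keys & {"recipe", "node_settings"}:
--         return "recipe"
--     if keys & {"topic", "scenario", "recommendation", "decision"}:
--         return "best_practice"
--     return "general"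
-- ===== SOURCE B (Python) =====
-- _GROUPS = [
--     ("errors", ("error", "symptoms", "cause", "fix", "detailed_solution")),
--     ("workflow", ("workflow", "steps", "prerequisites")),
--     ("recipe", ("recipe", "node_settings")),
--     ("best_practice", ("topic", "scenario", "recommendation", "decision")),
-- ]
--
-- _RANK = {}
-- for _i, (_name, _kws) in enumerate(_GROUPS):
--     for _kw in _kws:
--         _RANK[_kw] = _i
--
-- _NAMES = [name for name, _ in _GROUPS]
--
--
-- def _infer_list_entry_category(item: dict) -> str:
--     """Single pass over the entry's keys, tracking the best (lowest) category rank."""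
--     best = 4
--     for k in item:
--         best = min(best, _RANK.get(k.lower(), 4))
--     return _NAMES[best] if best < 4 else "general"
-- ===== Notes on version B (the rewrite author's own statement) =====
-- stated objective: alternative
-- what changed: Replaces A's per-category set-intersection tests with one reverse-index dict mapping each keyword to its category's priority rank, then a single pass over the entry's keys tracking the minimum rank and mapping it back to a category name.
import Mathlib
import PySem

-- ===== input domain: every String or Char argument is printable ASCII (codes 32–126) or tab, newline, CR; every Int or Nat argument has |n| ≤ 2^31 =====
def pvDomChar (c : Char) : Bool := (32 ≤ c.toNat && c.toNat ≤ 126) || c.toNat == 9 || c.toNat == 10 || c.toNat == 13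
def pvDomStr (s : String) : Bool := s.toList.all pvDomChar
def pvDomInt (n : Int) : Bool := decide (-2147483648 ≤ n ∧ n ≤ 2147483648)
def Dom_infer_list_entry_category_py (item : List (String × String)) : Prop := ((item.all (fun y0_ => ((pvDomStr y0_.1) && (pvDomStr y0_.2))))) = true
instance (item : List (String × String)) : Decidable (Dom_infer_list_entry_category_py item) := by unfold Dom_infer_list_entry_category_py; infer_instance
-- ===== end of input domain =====

-- B replaces A's four set-intersection tests with one reverse index keyword → priority rank and a
-- single min-rank pass over the entry's keys (objective: alternative decomposition, same cost).

-- ===== PORT A =====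
def infer_list_entry_category_py (item : List (String × String)) : String :=
  let keys : PySem.Set String := PySem.Set.ofList (item.map (fun p => PySem.Str.lower p.1))
  if PySem.Set.inter keys (PySem.Set.ofList ["error", "symptoms", "cause", "fix", "detailed_solution"]) ≠ [] then "errors"
  else if PySem.Set.inter keys (PySem.Set.ofList ["workflow", "steps", "prerequisites"]) ≠ [] then "workflow"
  else if PySem.Set.inter keys (PySem.Set.ofList ["recipe", "node_settings"]) ≠ [] then "recipe"
  else if PySem.Set.inter keys (PySem.Set.ofList ["topic", "scenario", "recommendation", "decision"]) ≠ [] then "best_practice"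
  else "general"

-- ===== PORT B =====
def pvGroups : List (String × List String) :=
  [("errors", ["error", "symptoms", "cause", "fix", "detailed_solution"]),
   ("workflow", ["workflow", "steps", "prerequisites"]),
   ("recipe", ["recipe", "node_settings"]),
   ("best_practice", ["topic", "scenario", "recommendation", "decision"])]

-- _RANK: reverse index keyword → priority rank, built once from pvGroups
def pvRank : PySem.Dict String Int :=
  (PySem.List.enumerate pvGroups).foldl
    (fun d ig => ig.2.2.foldl (fun d kw => PySem.Dict.insert d kw ig.1) d) PySem.Dict.empty

def pvNames : List String := pvGroups.map (fun g => g.1)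

def infer_list_entry_category_py_alt (item : List (String × String)) : String :=
  let best : Int :=
    item.foldl (fun best p => min best (PySem.Dict.getD pvRank (PySem.Str.lower p.1) 4)) 4
  if best < 4 then PySem.List.pyGetD pvNames best "" else "general"

-- ===== PRECONDITION & SPEC =====
def Spec_infer_list_entry_category_py (item : List (String × String)) (out : String) : Prop := out = infer_list_entry_category_py_alt item
instance (item : List (String × String)) (out : String) : Decidable (Spec_infer_list_entry_category_py item out) := by unfold Spec_infer_list_entry_category_py; infer_instance

-- ===== CLAIM (what is proved, stated in full; the proofs are below) =====
def Claim_equal_infer_list_entry_category_py : Prop := ∀ (item : List (String × String)), Dom_infer_list_entry_category_py item → Spec_infer_list_entry_category_py item (infer_list_entry_category_py item)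

-- ===== LEMMAS AND PROOFS =====

-- the rank of a keyword, as a direct case split (what the reverse index computes pointwise)
def rank1 (s : String) : Int :=
  if s ∈ ["error", "symptoms", "cause", "fix", "detailed_solution"] then 0
  else if s ∈ ["workflow", "steps", "prerequisites"] then 1
  else if s ∈ ["recipe", "node_settings"] then 2
  else if s ∈ ["topic", "scenario", "recommendation", "decision"] then 3
  else 4

theorem pvRank_eq : pvRank = PySem.Dict.mk [("error", (0:Int)), ("symptoms", 0), ("cause", 0), ("fix", 0),
    ("detailed_solution", 0), ("workflow", 1), ("steps", 1), ("prerequisites", 1),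
    ("recipe", 2), ("node_settings", 2), ("topic", 3), ("scenario", 3),
    ("recommendation", 3), ("decision", 3)] := by rfl

theorem getD_pvRank (s : String) : PySem.Dict.getD pvRank s 4 = rank1 s := by
  rw [pvRank_eq]
  by_cases hs : s ∈ ["error", "symptoms", "cause", "fix", "detailed_solution", "workflow",
      "steps", "prerequisites", "recipe", "node_settings", "topic", "scenario",
      "recommendation", "decision"]
  · simp only [List.mem_cons, List.not_mem_nil, or_false] at hs
    rcases hs with rfl|rfl|rfl|rfl|rfl|rfl|rfl|rfl|rfl|rfl|rfl|rfl|rfl|rfl <;> decide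
  · have hg : PySem.Dict.get? (PySem.Dict.mk [("error", (0:Int)), ("symptoms", 0), ("cause", 0), ("fix", 0),
        ("detailed_solution", 0), ("workflow", 1), ("steps", 1), ("prerequisites", 1),
        ("recipe", 2), ("node_settings", 2), ("topic", 3), ("scenario", 3),
        ("recommendation", 3), ("decision", 3)]) s = none := by
      rw [PySem.Dict.get?_eq_none_iff_not_mem_keys]
      simpa [PySem.Dict.keys] using hs
    simp only [List.mem_cons, List.not_mem_nil, or_false, not_or] at hs
    obtain ⟨a1,a2,a3,a4,a5,a6,a7,a8,a9,a10,a11,a12,a13,a14⟩ := hs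
    simp [PySem.Dict.getD, hg, rank1, a1,a2,a3,a4,a5,a6,a7,a8,a9,a10,a11,a12,a13,a14]

theorem rank1_bounds (s : String) : 0 ≤ rank1 s ∧ rank1 s ≤ 4 := by
  unfold rank1; split_ifs <;> omega

theorem foldl_min_acc (l : List Int) : ∀ a : Int, a ≤ 4 → l.foldl min a = min a (l.foldl min 4) := by
  induction l with
  | nil => intro a ha; simp; omega
  | cons x l ih =>
    intro a ha
    simp only [List.foldl_cons]
    rw [ih (min a x) (by omega), ih (min 4 x) (by omega)]
    omega

theorem foldl_min_chain (l : List Int) (h : ∀ x ∈ l, 0 ≤ x ∧ x ≤ 4) :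
    l.foldl min 4 = if (0:Int) ∈ l then 0 else if (1:Int) ∈ l then 1
      else if (2:Int) ∈ l then 2 else if (3:Int) ∈ l then 3 else 4 := by
  induction l with
  | nil => simp
  | cons x l ih =>
    have hx := h x (by simp)
    have hl : ∀ y ∈ l, 0 ≤ y ∧ y ≤ 4 := fun y hy => h y (by simp [hy])
    simp only [List.foldl_cons]
    rw [foldl_min_acc l (min 4 x) (by omega), ih hl]
    simp only [List.mem_cons]
    by_cases h0 : (0:Int) ∈ l <;> by_cases h1 : (1:Int) ∈ l <;> by_cases h2 : (2:Int) ∈ l <;>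
      by_cases h3 : (3:Int) ∈ l <;> simp [h0, h1, h2, h3] <;> (try split_ifs) <;> omega

theorem inter_ne_nil (item : List (String × String)) (g : List String) :
    PySem.Set.inter (PySem.Set.ofList (item.map (fun p => PySem.Str.lower p.1)))
      (PySem.Set.ofList g) ≠ [] ↔ ∃ p ∈ item, PySem.Str.lower p.1 ∈ g := by
  rw [Ne, List.eq_nil_iff_forall_not_mem]
  simp [pysem]

theorem main_eq (item : List (String × String)) :
    infer_list_entry_category_py item = infer_list_entry_category_py_alt item := by
  simp only [infer_list_entry_category_py, infer_list_entry_category_py_alt]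
  have hb : item.foldl (fun best p => min best (PySem.Dict.getD pvRank (PySem.Str.lower p.1) 4)) 4
      = (item.map (fun p => rank1 (PySem.Str.lower p.1))).foldl min 4 := by
    rw [List.foldl_map]; simp only [getD_pvRank]
  have hbound : ∀ x ∈ item.map (fun p => rank1 (PySem.Str.lower p.1)), 0 ≤ x ∧ x ≤ 4 := by
    intro x hx
    simp only [List.mem_map] at hx
    obtain ⟨p, _, rfl⟩ := hx
    exact rank1_bounds _
  rw [hb, foldl_min_chain _ hbound]
  have hm : ∀ v : Int, ((v ∈ item.map (fun p => rank1 (PySem.Str.lower p.1)))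
      ↔ ∃ p ∈ item, rank1 (PySem.Str.lower p.1) = v) := by
    intro v; simp [List.mem_map, eq_comm]
  by_cases he : ∃ p ∈ item, PySem.Str.lower p.1 ∈ ["error", "symptoms", "cause", "fix", "detailed_solution"]
  · have h0 : ∃ p ∈ item, rank1 (PySem.Str.lower p.1) = 0 := by
      obtain ⟨p, hp, hmem⟩ := he; exact ⟨p, hp, by simp [rank1, hmem]⟩
    rw [if_pos ((inter_ne_nil _ _).mpr he), if_pos ((hm 0).mpr h0)]
    decide
  · have h0 : ¬ ∃ p ∈ item, rank1 (PySem.Str.lower p.1) = 0 := by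
      rintro ⟨p, hp, hr⟩
      refine he ⟨p, hp, ?_⟩
      by_contra hmem
      simp only [rank1, if_neg hmem] at hr
      split_ifs at hr <;> omega
    have hn0 : ¬ ((0:Int) ∈ item.map (fun p => rank1 (PySem.Str.lower p.1))) :=
      fun hc => h0 ((hm 0).mp hc)
    rw [if_neg (fun hc => he ((inter_ne_nil item ["error", "symptoms", "cause", "fix", "detailed_solution"]).mp hc)), if_neg hn0]
    by_cases hw : ∃ p ∈ item, PySem.Str.lower p.1 ∈ ["workflow", "steps", "prerequisites"]
    · have h1 : ∃ p ∈ item, rank1 (PySem.Str.lower p.1) = 1 := by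
        obtain ⟨p, hp, hmem⟩ := hw
        have hne : PySem.Str.lower p.1 ∉ ["error", "symptoms", "cause", "fix", "detailed_solution"] :=
          fun hc => he ⟨p, hp, hc⟩
        exact ⟨p, hp, by simp [rank1, hmem, hne]⟩
      rw [if_pos ((inter_ne_nil _ _).mpr hw), if_pos ((hm 1).mpr h1)]
      decide
    · have h1 : ¬ ∃ p ∈ item, rank1 (PySem.Str.lower p.1) = 1 := by
        rintro ⟨p, hp, hr⟩
        simp only [rank1] at hr
        split_ifs at hr with c1 c2 <;> try omega
        exact hw ⟨p, hp, c2⟩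
      have hn1 : ¬ ((1:Int) ∈ item.map (fun p => rank1 (PySem.Str.lower p.1))) :=
        fun hc => h1 ((hm 1).mp hc)
      rw [if_neg (fun hc => hw ((inter_ne_nil item ["workflow", "steps", "prerequisites"]).mp hc)), if_neg hn1]
      by_cases hr2 : ∃ p ∈ item, PySem.Str.lower p.1 ∈ ["recipe", "node_settings"]
      · have h2 : ∃ p ∈ item, rank1 (PySem.Str.lower p.1) = 2 := by
          obtain ⟨p, hp, hmem⟩ := hr2
          have hne : PySem.Str.lower p.1 ∉ ["error", "symptoms", "cause", "fix", "detailed_solution"] :=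
            fun hc => he ⟨p, hp, hc⟩
          have hnw : PySem.Str.lower p.1 ∉ ["workflow", "steps", "prerequisites"] :=
            fun hc => hw ⟨p, hp, hc⟩
          exact ⟨p, hp, by simp [rank1, hmem, hne, hnw]⟩
        rw [if_pos ((inter_ne_nil _ _).mpr hr2), if_pos ((hm 2).mpr h2)]
        decide
      · have h2 : ¬ ∃ p ∈ item, rank1 (PySem.Str.lower p.1) = 2 := by
          rintro ⟨p, hp, hr⟩
          simp only [rank1] at hr
          split_ifs at hr with c1 c2 c3 <;> try omega
          exact hr2 ⟨p, hp, c3⟩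
        have hn2 : ¬ ((2:Int) ∈ item.map (fun p => rank1 (PySem.Str.lower p.1))) :=
          fun hc => h2 ((hm 2).mp hc)
        rw [if_neg (fun hc => hr2 ((inter_ne_nil item ["recipe", "node_settings"]).mp hc)), if_neg hn2]
        by_cases hbp : ∃ p ∈ item, PySem.Str.lower p.1 ∈ ["topic", "scenario", "recommendation", "decision"]
        · have h3 : ∃ p ∈ item, rank1 (PySem.Str.lower p.1) = 3 := by
            obtain ⟨p, hp, hmem⟩ := hbp
            have hne : PySem.Str.lower p.1 ∉ ["error", "symptoms", "cause", "fix", "detailed_solution"] :=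
              fun hc => he ⟨p, hp, hc⟩
            have hnw : PySem.Str.lower p.1 ∉ ["workflow", "steps", "prerequisites"] :=
              fun hc => hw ⟨p, hp, hc⟩
            have hnr : PySem.Str.lower p.1 ∉ ["recipe", "node_settings"] :=
              fun hc => hr2 ⟨p, hp, hc⟩
            exact ⟨p, hp, by simp [rank1, hmem, hne, hnw, hnr]⟩
          rw [if_pos ((inter_ne_nil _ _).mpr hbp), if_pos ((hm 3).mpr h3)]
          decide
        · have h3 : ¬ ∃ p ∈ item, rank1 (PySem.Str.lower p.1) = 3 := by
            rintro ⟨p, hp, hr⟩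
            simp only [rank1] at hr
            split_ifs at hr with c1 c2 c3 c4 <;> try omega
            exact hbp ⟨p, hp, c4⟩
          have hn3 : ¬ ((3:Int) ∈ item.map (fun p => rank1 (PySem.Str.lower p.1))) :=
            fun hc => h3 ((hm 3).mp hc)
          rw [if_neg (fun hc => hbp ((inter_ne_nil item ["topic", "scenario", "recommendation", "decision"]).mp hc)), if_neg hn3]
          decide

-- ===== VERDICT (by name: the statement is the Claim_ definition above) =====
theorem infer_list_entry_category_py_spec : Claim_equal_infer_list_entry_category_py := by
  intro item _
  unfold Spec_infer_list_entry_category_py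
  exact main_eq item
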